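-- pv_equiv track=rewrite | github.com/ChrisCreevey/gene_order_from_pangenome | gene_order_from_pangenome.py | reverse_within_contigs
-- ===== SOURCE A (Python) =====
-- def reverse_within_contigs(genes, contig_sep):
--     """
--     Reverse gene order within each contig segment independently.
--
--     GFF files list all genes in reference (+ strand) coordinate order. For minus strand
--     genes this means they appear 3'→5'. Reversing within each contig corrects this so
--     that genes read 5'→3' along the minus strand, while keeping contigs in their
--     original order.
--
--     If no contig_sep is set the entire list is simply reversed.
--     """
--     if not contig_sep:
--         return list(reversed(genes))
--
--     # Split into contig segments, reverse each, then rejoin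
--     segments = []
--     current = []
--     for gene in genes:
--         if gene == contig_sep:
--             segments.append(current)
--             current = []
--         else:
--             current.append(gene)
--     segments.append(current)
--
--     result = []
--     for i, segment in enumerate(segments):
--         result.extend(reversed(segment))
--         if i < len(segments) - 1:
--             result.append(contig_sep)
--     return result
-- ===== SOURCE B (Python) =====
-- def reverse_within_contigs(genes, contig_sep):
--     """Recursive re-implementation: split at the first separator, reverse the
--     prefix segment, and recurse on the remainder."""
--     if not contig_sep or contig_sep not in genes:
--         return list(reversed(genes))
--     i = genes.index(contig_sep)
--     return list(reversed(genes[:i])) + [contig_sep] + reverse_within_contigs(genes[i + 1:], contig_sep)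
-- ===== Notes on version B (the rewrite author's own statement) =====
-- stated objective: simpler
-- what changed: Replaced the two-phase iterative version (accumulate a list of segments, then re-join with enumerate/index bookkeeping) by a short recursion that splits at the first separator, reverses the prefix and recurses on the rest.
import Mathlib
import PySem

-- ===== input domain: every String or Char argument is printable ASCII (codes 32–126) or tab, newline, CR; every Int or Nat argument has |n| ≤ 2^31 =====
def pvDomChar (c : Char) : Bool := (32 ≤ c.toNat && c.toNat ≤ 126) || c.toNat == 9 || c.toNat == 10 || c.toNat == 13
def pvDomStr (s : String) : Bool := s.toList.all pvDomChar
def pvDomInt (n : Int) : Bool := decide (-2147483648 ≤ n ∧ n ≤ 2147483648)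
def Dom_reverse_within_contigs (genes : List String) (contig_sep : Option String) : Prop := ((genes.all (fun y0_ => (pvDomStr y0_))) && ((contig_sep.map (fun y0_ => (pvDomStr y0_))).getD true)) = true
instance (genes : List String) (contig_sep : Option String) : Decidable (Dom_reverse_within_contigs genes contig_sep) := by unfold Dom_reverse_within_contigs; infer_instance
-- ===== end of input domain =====

-- B replaces A's two-phase loop (collect segments, then rejoin with index bookkeeping)
-- by a shorter recursion on the first separator occurrence; objective: simpler, same cost.

-- ===== PORT A =====
-- phase-1 loop body of A: split genes into contig segments at contig_sep
def reverse_within_contigs_step (sep : String)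
    (st : List (List String) × List String) (gene : String) :
    List (List String) × List String :=
  if gene = sep then (st.1 ++ [st.2], []) else (st.1, st.2 ++ [gene])

def reverse_within_contigs (genes : List String) (contig_sep : Option String) : List String :=
  match contig_sep with
  | none => genes.reverse
  | some sep =>
    if sep = "" then genes.reverse
    else
      let st := genes.foldl (reverse_within_contigs_step sep) ([], [])
      let segments := st.1 ++ [st.2]
      (PySem.List.enumerate segments 0).foldl
        (fun result p =>
          let result := result ++ p.2.reverse
          if p.1 < (segments.length : Int) - 1 then result ++ [sep] else result)
        []

-- ===== PORT B =====
-- recursion of Source B: if sep not in genes, reverse; else split at first sep and recurse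
def reverse_within_contigs_altGo (genes : List String) (sep : String) : List String :=
  match h : PySem.List.index? genes sep with
  | none => genes.reverse
  | some i =>
      (genes.take i).reverse ++ [sep] ++ reverse_within_contigs_altGo (genes.drop (i + 1)) sep
termination_by genes.length
decreasing_by
  · obtain ⟨hk, -, -⟩ := PySem.List.getElem_of_index?_eq_some h
    simp only [List.length_drop]
    omega

def reverse_within_contigs_alt (genes : List String) (contig_sep : Option String) : List String :=
  match contig_sep with
  | none => genes.reverse
  | some sep =>
    if sep = "" then genes.reverse
    else reverse_within_contigs_altGo genes sep

-- ===== PRECONDITION & SPEC =====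
def Spec_reverse_within_contigs (genes : List String) (contig_sep : Option String) (out : List String) : Prop := out = reverse_within_contigs_alt genes contig_sep
instance (genes : List String) (contig_sep : Option String) (out : List String) : Decidable (Spec_reverse_within_contigs genes contig_sep out) := by unfold Spec_reverse_within_contigs; infer_instance

-- ===== CLAIM (what is proved, stated in full; the proofs are below) =====
def Claim_equal_reverse_within_contigs : Prop := ∀ (genes : List String) (contig_sep : Option String), Dom_reverse_within_contigs genes contig_sep → Spec_reverse_within_contigs genes contig_sep (reverse_within_contigs genes contig_sep)

-- ===== LEMMAS AND PROOFS =====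

-- recursive characterisation of A's phase-1 result st.1 ++ [st.2]
def pvSplit (sep : String) : List String → List String → List (List String)
  | [], cur => [cur]
  | x :: t, cur => if x = sep then cur :: pvSplit sep t [] else pvSplit sep t (cur ++ [x])

-- the intended output: reversed segments joined by sep
def pvJoinRev (sep : String) : List (List String) → List String
  | [] => []
  | [s] => s.reverse
  | s :: t => s.reverse ++ [sep] ++ pvJoinRev sep t

theorem pvSplit_ne_nil (sep : String) (xs cur : List String) : pvSplit sep xs cur ≠ [] := by
  induction xs generalizing cur with
  | nil => simp [pvSplit]
  | cons x t ih =>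
    simp only [pvSplit]
    split_ifs
    · simp
    · exact ih _

theorem pvJoinRev_cons (sep : String) (s : List String) (t : List (List String)) (ht : t ≠ []) :
    pvJoinRev sep (s :: t) = s.reverse ++ [sep] ++ pvJoinRev sep t := by
  cases t with
  | nil => exact absurd rfl ht
  | cons a b => rfl

theorem foldl_step_acc (sep : String) (xs : List String) :
    ∀ (acc : List (List String)) (cur : List String),
      xs.foldl (reverse_within_contigs_step sep) (acc, cur) =
        (acc ++ (xs.foldl (reverse_within_contigs_step sep) ([], cur)).1,
         (xs.foldl (reverse_within_contigs_step sep) ([], cur)).2) := by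
  induction xs with
  | nil => simp
  | cons x t ih =>
    intro acc cur
    simp only [List.foldl_cons, reverse_within_contigs_step]
    split_ifs
    · simp only [List.nil_append]
      rw [ih (acc ++ [cur]) [], ih [cur] []]
      simp
    · exact ih acc (cur ++ [x])

-- phase 1 computes pvSplit
theorem foldl_eq_pvSplit (sep : String) (xs : List String) :
    ∀ (cur : List String),
      (xs.foldl (reverse_within_contigs_step sep) ([], cur)).1 ++
        [(xs.foldl (reverse_within_contigs_step sep) ([], cur)).2] = pvSplit sep xs cur := by
  induction xs with
  | nil => simp [pvSplit]
  | cons x t ih =>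
    intro cur
    simp only [List.foldl_cons, reverse_within_contigs_step, pvSplit]
    split_ifs
    · simp only [List.nil_append]
      rw [foldl_step_acc sep t [cur] []]
      simpa using ih []
    · exact ih (cur ++ [x])

-- phase 2 computes pvJoinRev
theorem foldl_eq_pvJoinRev (sep : String) (n : Int) :
    ∀ (segs : List (List String)) (k : Int) (acc : List String), k + segs.length = n →
      (PySem.List.enumerate segs k).foldl
        (fun result p =>
          let result := result ++ p.2.reverse
          if p.1 < n - 1 then result ++ [sep] else result) acc
      = acc ++ pvJoinRev sep segs := by
  intro segs
  induction segs with
  | nil =>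
    intro _ acc _
    simp [PySem.List.enumerate_nil, pvJoinRev]
  | cons s rest ih =>
    intro k acc hk
    rw [PySem.List.enumerate_cons]
    simp only [List.foldl_cons, List.length_cons] at hk ⊢
    cases rest with
    | nil =>
      have hnlt : ¬ (k < n - 1) := by simp only [List.length_nil] at hk; omega
      simp [PySem.List.enumerate_nil, hnlt, pvJoinRev]
    | cons r rs =>
      have hlt : k < n - 1 := by simp only [List.length_cons] at hk; push_cast at hk; omega
      simp only [hlt, if_true]
      rw [ih (k + 1) _ (by simp only [List.length_cons] at hk ⊢; push_cast at hk ⊢; omega)]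
      rw [pvJoinRev_cons sep s (r :: rs) (by simp)]
      simp

theorem pvSplit_no_sep (sep : String) (xs : List String) :
    ∀ cur, sep ∉ xs → pvSplit sep xs cur = [cur ++ xs] := by
  induction xs with
  | nil => intro cur _; simp [pvSplit]
  | cons x t ih =>
    intro cur hx
    simp only [List.mem_cons, not_or] at hx
    simp only [pvSplit, if_neg (fun (h : x = sep) => hx.1 h.symm)]
    rw [ih _ hx.2]
    simp

theorem pvSplit_first (sep : String) (pre : List String) (rest : List String) :
    ∀ cur, sep ∉ pre → pvSplit sep (pre ++ sep :: rest) cur = (cur ++ pre) :: pvSplit sep rest [] := by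
  induction pre with
  | nil => intro cur _; simp [pvSplit]
  | cons x t ih =>
    intro cur hpre
    simp only [List.mem_cons, not_or] at hpre
    simp only [List.cons_append, pvSplit, if_neg (fun (h : x = sep) => hpre.1 h.symm)]
    rw [ih _ hpre.2]
    simp

theorem altGo_eq_aux (sep : String) : ∀ (n : Nat) (genes : List String), genes.length ≤ n →
    reverse_within_contigs_altGo genes sep = pvJoinRev sep (pvSplit sep genes []) := by
  intro n
  induction n with
  | zero =>
    intro genes h
    have : genes = [] := List.eq_nil_of_length_eq_zero (Nat.le_zero.mp h)
    subst this
    simp [reverse_within_contigs_altGo, pvSplit, pvJoinRev]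
  | succ n ih =>
    intro genes h
    unfold reverse_within_contigs_altGo
    split
    case _ hidx =>
      rw [pvSplit_no_sep sep genes [] (((PySem.List.index?_eq_none_iff _ _).mp hidx))]
      simp [pvJoinRev]
    case _ i hidx =>
      obtain ⟨pre, suf, hg, hlen, hpre⟩ := (PySem.List.index?_eq_some_iff _ _ _).mp hidx
      subst hg
      subst hlen
      have htake : (pre ++ sep :: suf).take pre.length = pre := List.take_left
      have hdrop : (pre ++ sep :: suf).drop (pre.length + 1) = suf := by
        have : pre ++ sep :: suf = (pre ++ [sep]) ++ suf := by simp
        rw [this]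
        have hl : (pre ++ [sep]).length = pre.length + 1 := by simp
        rw [← hl, List.drop_left]
      rw [htake, hdrop]
      rw [pvSplit_first sep pre suf [] hpre]
      rw [pvJoinRev_cons sep _ _ (pvSplit_ne_nil sep suf [])]
      rw [ih suf (by simp at h; omega)]
      simp

theorem altGo_eq (sep : String) (genes : List String) :
    reverse_within_contigs_altGo genes sep = pvJoinRev sep (pvSplit sep genes []) :=
  altGo_eq_aux sep genes.length genes le_rfl

-- ===== VERDICT (by name: the statement is the Claim_ definition above) =====
theorem reverse_within_contigs_spec : Claim_equal_reverse_within_contigs := by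
  intro genes contig_sep _
  unfold Spec_reverse_within_contigs
  cases contig_sep with
  | none => rfl
  | some sep =>
    by_cases hsep : sep = ""
    · simp [reverse_within_contigs, reverse_within_contigs_alt, hsep]
    · simp only [reverse_within_contigs, reverse_within_contigs_alt, if_neg hsep]
      rw [altGo_eq sep genes]
      rw [foldl_eq_pvJoinRev sep _ _ 0 [] (by simp)]
      rw [foldl_eq_pvSplit sep genes []]
      simp
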